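-- pv_equiv track=rewrite | github.com/phoenixcrypto/unich-ultimate | modules/gmail_dot_generator.py | generate_gmail_dot_variants
-- ===== SOURCE A (Python) =====
-- def generate_gmail_dot_variants(username):
--     """
--     Generate all possible Gmail dot trick variants for a given username (before @).
--     Gmail ignores dots in the username, so all variants reach the same inbox.
--     """
--     results = []
--     n = len(username) - 1
--     max_val = 1 << n
--     for i in range(max_val):
--         variant = ''
--         for j in range(n):
--             variant += username[j]
--             if i & (1 << j):
--                 variant += '.'
--         variant += username[n]
--         results.append(variant + "@gmail.com")
--     return results
-- ===== SOURCE B (Python) =====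
-- def generate_gmail_dot_variants(username):
--     if not username:
--         raise ValueError("username must be non-empty")
--     res = [username[-1]]
--     for ch in reversed(username[:-1]):
--         res = [p for r in res for p in (ch + r, ch + '.' + r)]
--     return [r + "@gmail.com" for r in res]
-- ===== Notes on version B (the rewrite author's own statement) =====
-- stated objective: alternative
-- what changed: Replaces A's bitmask loop over range(2^(n-1)) with an inner per-character loop by an incremental doubling build: starting from the last character, each earlier character maps every partial variant to its (no-dot, dot) pair, built right-to-left so gap 0 varies fastest exactly as A's LSB order.
import Mathlib
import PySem

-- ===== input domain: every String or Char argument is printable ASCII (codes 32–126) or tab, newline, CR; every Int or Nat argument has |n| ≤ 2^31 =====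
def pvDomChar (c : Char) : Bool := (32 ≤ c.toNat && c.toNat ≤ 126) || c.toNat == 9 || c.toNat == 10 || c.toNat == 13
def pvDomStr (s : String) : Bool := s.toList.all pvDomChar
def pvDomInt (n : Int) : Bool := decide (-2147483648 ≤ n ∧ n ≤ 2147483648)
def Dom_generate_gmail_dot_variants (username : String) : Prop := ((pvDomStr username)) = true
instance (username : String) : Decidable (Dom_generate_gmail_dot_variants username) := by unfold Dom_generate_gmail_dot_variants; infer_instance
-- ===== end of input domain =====

-- B builds the variants by incremental doubling over the characters (right-to-left)
-- instead of A's bitmask loop over range(2^n); objective: alternative decomposition, same output.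

-- ===== PORT A =====
-- Literal port of A. On Pre_ (username ≠ "") we have n = len-1 ≥ 0 and every index j ≤ n
-- is in range, so Nat arithmetic and `getD` are exact here ('1 << n' = 2^n, indexing never fails).
def generate_gmail_dot_variants (username : String) : List String :=
  let cs := username.toList
  let n := cs.length - 1
  let max_val := 2 ^ n
  (List.range max_val).foldl (fun results i =>
    let variant : List Char :=
      (List.range n).foldl (fun v j =>
        let v := v ++ [cs.getD j ' ']
        if i &&& (1 <<< j) ≠ 0 then v ++ ['.'] else v) []
    let variant := variant ++ [cs.getD n ' ']
    results ++ [String.ofList variant ++ "@gmail.com"]) []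

-- ===== PORT B =====
-- B's loop 'for ch in reversed(username[:-1]): res = [p for r in res for p in (ch+r, ch+'.'+r)]'
-- is exactly the structural recursion on the prefix list from the front (each step prepends one char).
def pvBuild (p : List Char) (last : Char) : List (List Char) :=
  match p with
  | [] => [[last]]
  | c :: rest => (pvBuild rest last).flatMap (fun r => [c :: r, c :: '.' :: r])

def generate_gmail_dot_variants_alt (username : String) : List String :=
  let cs := username.toList
  if cs = [] then []    -- B raises ValueError here; outside Pre_
  else (pvBuild cs.dropLast (cs.getLastD ' ')).map (fun r => String.ofList r ++ "@gmail.com")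

-- ===== PRECONDITION & SPEC =====
-- Pre_ excludes only the empty string, on which both A (left shift by the negative count len-1) and B (explicit guard) raise ValueError.
def Pre_generate_gmail_dot_variants (username : String) : Prop := username ≠ ""
instance (username : String) : Decidable (Pre_generate_gmail_dot_variants username) := by
  unfold Pre_generate_gmail_dot_variants; infer_instance

def pvWitness_generate_gmail_dot_variants : String := "abc"

def Spec_generate_gmail_dot_variants (username : String) (out : List String) : Prop := out = generate_gmail_dot_variants_alt username
instance (username : String) (out : List String) : Decidable (Spec_generate_gmail_dot_variants username out) := by unfold Spec_generate_gmail_dot_variants; infer_instance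

-- ===== CLAIM (what is proved, stated in full; the proofs are below) =====
def Claim_equal_generate_gmail_dot_variants : Prop := ∀ (username : String), Dom_generate_gmail_dot_variants username → Pre_generate_gmail_dot_variants username → Spec_generate_gmail_dot_variants username (generate_gmail_dot_variants username)

-- ===== LEMMAS AND PROOFS =====

-- A's inner loop as a function of the mask i, with the last character split off (cs = p ++ [last]).
def pvAVar (p : List Char) (last : Char) (i : Nat) : List Char :=
  ((List.range p.length).foldl (fun v j =>
      let v := v ++ [(p ++ [last]).getD j ' ']
      if i &&& (1 <<< j) ≠ 0 then v ++ ['.'] else v) []) ++ [last]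

lemma pvFoldl_append (h : Nat → List Char) :
    ∀ (l : List Nat) (acc : List Char),
      l.foldl (fun a x => a ++ h x) acc = acc ++ l.flatMap h := by
  intro l
  induction l with
  | nil => simp
  | cons x xs ih => intro acc; simp [List.foldl_cons, ih]

lemma pvBit (i j : Nat) : (i &&& (1 <<< j) ≠ 0) ↔ i.testBit j = true := by
  rw [Nat.one_shiftLeft, Nat.and_two_pow]
  cases h : i.testBit j <;> simp

lemma pvAVar_eq_flatMap (p : List Char) (last : Char) (i : Nat) :
    pvAVar p last i =
      ((List.range p.length).flatMap (fun j =>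
        (p ++ [last]).getD j ' ' :: (if i.testBit j then ['.'] else []))) ++ [last] := by
  unfold pvAVar
  have hf : (fun (v : List Char) (j : Nat) =>
      let v := v ++ [(p ++ [last]).getD j ' ']
      if i &&& (1 <<< j) ≠ 0 then v ++ ['.'] else v) =
      (fun v j => v ++ ((p ++ [last]).getD j ' ' :: (if i.testBit j then ['.'] else []))) := by
    funext v j
    by_cases h : i.testBit j <;> simp [pvBit, h]
  rw [hf, pvFoldl_append]
  simp

lemma pvAVar_cons (c : Char) (p : List Char) (last : Char) (i : Nat) :
    pvAVar (c :: p) last i =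
      c :: ((if i.testBit 0 then ['.'] else []) ++ pvAVar p last (i / 2)) := by
  rw [pvAVar_eq_flatMap, pvAVar_eq_flatMap]
  rw [List.length_cons, List.range_succ_eq_map, List.flatMap_cons, List.flatMap_map]
  simp [Nat.testBit_succ, List.getD]

lemma pvRange_double (K : Nat) (F : Nat → List Char) :
    (List.range (2 * K)).map F = (List.range K).flatMap (fun k => [F (2 * k), F (2 * k + 1)]) := by
  induction K with
  | zero => simp
  | succ K ih =>
      have h : 2 * (K + 1) = (2 * K + 1) + 1 := by ring
      rw [h, List.range_succ, List.range_succ, List.range_succ]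
      simp [ih]

lemma pvMain (p : List Char) (last : Char) :
    (List.range (2 ^ p.length)).map (fun i => pvAVar p last i) = pvBuild p last := by
  induction p with
  | nil => simp [pvAVar, pvBuild]
  | cons c rest ih =>
      rw [List.length_cons, pow_succ, Nat.mul_comm, pvRange_double]
      show _ = (pvBuild rest last).flatMap (fun r => [c :: r, c :: '.' :: r])
      rw [← ih, List.flatMap_map]
      refine List.flatMap_congr ?_
      intro k _
      have h3 : 2 * k / 2 = k := by omega
      have h4 : (2 * k + 1) / 2 = k := by omega
      have h1 : (2 * k).testBit 0 = false := by
        simp [Nat.testBit_zero]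
      have h2 : (2 * k + 1).testBit 0 = true := by
        simp [Nat.testBit_zero]
      rw [pvAVar_cons, pvAVar_cons, h1, h2, h3, h4]
      simp

lemma pvA_split (p : List Char) (last : Char) :
    (List.range (2 ^ p.length)).foldl (fun results i =>
      results ++ [String.ofList (((List.range p.length).foldl (fun v j =>
          let v := v ++ [(p ++ [last]).getD j ' ']
          if i &&& (1 <<< j) ≠ 0 then v ++ ['.'] else v) []) ++ [(p ++ [last]).getD p.length ' ']) ++ "@gmail.com"]) []
    = (pvBuild p last).map (fun r => String.ofList r ++ "@gmail.com") := by
  have hgl : (p ++ [last]).getD p.length ' ' = last := by simp [List.getD]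
  rw [hgl]
  show (List.range (2 ^ p.length)).foldl
      (fun results i => results ++ [String.ofList (pvAVar p last i) ++ "@gmail.com"]) [] = _
  rw [PySem.List.foldl_append_singleton_eq_map (fun i => String.ofList (pvAVar p last i) ++ "@gmail.com")]
  rw [show (fun i => String.ofList (pvAVar p last i) ++ "@gmail.com") =
      (fun r => String.ofList r ++ "@gmail.com") ∘ (fun i => pvAVar p last i) from rfl,
    ← List.map_map, pvMain]
  simp

-- ===== VERDICT (by name: the statement is the Claim_ definition above) =====
theorem generate_gmail_dot_variants_spec : Claim_equal_generate_gmail_dot_variants := by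
  intro u hdom hpre
  unfold Spec_generate_gmail_dot_variants
  have hnil : u.toList ≠ [] := fun h => hpre (String.toList_eq_nil_iff.mp h)
  simp only [generate_gmail_dot_variants, generate_gmail_dot_variants_alt]
  rw [if_neg hnil]
  rw [List.getLastD_eq_getLast?, List.getLast?_eq_some_getLast hnil, Option.getD_some]
  conv_lhs => rw [show u.toList = u.toList.dropLast ++ [u.toList.getLast hnil] from
    (List.dropLast_append_getLast hnil).symm]
  rw [show (u.toList.dropLast ++ [u.toList.getLast hnil]).length - 1 = u.toList.dropLast.length from by simp]
  exact pvA_split _ _
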